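-- pv_equiv track=rewrite | github.com/JamJam-github/JamJam.codingTest | programmers_1Level/24exam.py | solution
-- ===== SOURCE A (Python) =====
-- from itertools import combinations
--
-- def solution(d, budget):
--     if sum(d) <= budget:
--         return len(d)
--     for i in range(len(d) - 1, 0, -1):
--         l = list(combinations(d, i))
--         s = [i for i in l if sum(i) == budget]
--         if s:
--             return i
-- ===== SOURCE B (Python) =====
-- def solution(d, budget):
--     total = sum(d)
--     if total <= budget:
--         return len(d)
--     n = len(d)
--     # a size-k subset sums to budget iff its complement (size c = n - k) sums
--     # to total - budget; try complement sizes c = 1, 2, ... (largest k first)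
--     target = total - budget
--     for c in range(1, n):
--         # rows[j] = set of sums achievable with exactly j items (capped at c)
--         rows = [{0}] + [set() for _ in range(c)]
--         for x in d:
--             # descending j: each update reads the pre-update value of rows[j-1]
--             for j in range(c, 0, -1):
--                 rows[j] |= {s + x for s in rows[j - 1]}
--         if target in rows[c]:
--             return n - c
--     return None
-- ===== Notes on version B (the rewrite author's own statement) =====
-- stated objective: alternative
-- what changed: Replaced the per-size enumeration of all combinations (itertools.combinations for each size i) by a count-capped subset-sum DP on the complement: for complement sizes c = 1, 2, ... it maintains the sets of sums achievable with exactly j <= c items and returns n - c at the first feasible c.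
import Mathlib
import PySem

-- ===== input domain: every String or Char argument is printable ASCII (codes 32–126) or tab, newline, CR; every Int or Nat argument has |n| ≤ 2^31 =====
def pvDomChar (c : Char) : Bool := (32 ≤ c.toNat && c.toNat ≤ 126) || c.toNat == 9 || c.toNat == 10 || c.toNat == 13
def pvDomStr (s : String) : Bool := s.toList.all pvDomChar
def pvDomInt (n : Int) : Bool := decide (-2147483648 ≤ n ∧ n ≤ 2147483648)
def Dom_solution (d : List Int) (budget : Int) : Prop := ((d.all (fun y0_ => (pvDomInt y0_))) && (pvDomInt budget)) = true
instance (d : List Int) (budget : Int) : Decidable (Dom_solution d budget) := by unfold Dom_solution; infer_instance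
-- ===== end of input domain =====

-- B replaces A's per-size enumeration of all combinations by a count-capped
-- subset-sum DP on the complement (sets of sums with exactly j items, smallest
-- complement size first).

-- ===== PORT A =====
-- itertools.combinations(d, k) (lexicographic by position, as lists)
def combos : Nat → List Int → List (List Int)
  | 0, _ => [[]]
  | _ + 1, [] => []
  | k + 1, x :: xs => ((combos k xs).map (fun c => x :: c)) ++ combos (k + 1) xs

-- the 'for i in range(len(d)-1, 0, -1)' loop of A
def aLoop (d : List Int) (budget : Int) : List Int → Option Int
  | [] => none
  | i :: rest =>
      let l := combos i.toNat d
      let s := l.filter (fun c => c.sum == budget)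
      if s = [] then aLoop d budget rest else some i

def solution (d : List Int) (budget : Int) : Option Int :=
  if d.sum ≤ budget then some (d.length : Int)
  else aLoop d budget (PySem.List.pyRange ((d.length : Int) - 1) 0 (-1))

-- ===== PORT B =====
-- {s + x for s in p}
def shiftSet (p : PySem.Set Int) (x : Int) : PySem.Set Int :=
  PySem.Set.ofList (p.map (fun s => s + x))

-- the inner 'for j in range(c, 0, -1)' loop: rows[j] |= {s+x for s in rows[j-1]};
-- descending j means every update reads the PRE-update value of rows[j-1], i.e.
-- new rows = rows[0] :: [rows[j] | shift(rows[j-1]) for j = 1..c]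
def rowStep (x : Int) : PySem.Set Int → List (PySem.Set Int) → List (PySem.Set Int)
  | _, [] => []
  | prev, cur :: rest => PySem.Set.union cur (shiftSet prev x) :: rowStep x cur rest

-- one 'for x in d' iteration over the capped rows
def itemStep (t : List (PySem.Set Int)) (x : Int) : List (PySem.Set Int) :=
  match t with
  | [] => []
  | p :: rest => p :: rowStep x p rest

-- rows = [{0}] + [set() for _ in range(c)], then the 'for x in d' pass
def cappedRows (d : List Int) (c : Nat) : List (PySem.Set Int) :=
  d.foldl itemStep (PySem.Set.ofList [0] :: List.replicate c PySem.Set.empty)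

-- the outer 'for c in range(1, n)' loop; c is always a valid index of rows
-- (rows has length c+1), so the none branch is unreachable
def bLoop (d : List Int) (target : Int) (n : Int) : List Int → Option Int
  | [] => none
  | c :: rest =>
      let rows := cappedRows d c.toNat
      match PySem.List.pyGet? rows c with
      | some s => if target ∈ s then some (n - c) else bLoop d target n rest
      | none => none

def solution_alt (d : List Int) (budget : Int) : Option Int :=
  let total := d.sum
  if total ≤ budget then some (d.length : Int)
  else bLoop d (total - budget) (d.length : Int) (PySem.List.pyRange 1 (d.length : Int) 1)

-- ===== PRECONDITION & SPEC =====
def Spec_solution (d : List Int) (budget : Int) (out : Option Int) : Prop := out = solution_alt d budget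
instance (d : List Int) (budget : Int) (out : Option Int) : Decidable (Spec_solution d budget out) := by unfold Spec_solution; infer_instance

-- ===== CLAIM (what is proved, stated in full; the proofs are below) =====
def Claim_equal_solution : Prop := ∀ (d : List Int) (budget : Int), Dom_solution d budget → Spec_solution d budget (solution d budget)

-- ===== LEMMAS AND PROOFS =====

/-- 'there is a sub-combination of l with exactly k elements summing to s' -/
def Reach (l : List Int) (k : Nat) (s : Int) : Prop :=
  ∃ c : List Int, c.Sublist l ∧ c.length = k ∧ c.sum = s

lemma mem_combos : ∀ (l : List Int) (k : Nat) (c : List Int),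
    c ∈ combos k l ↔ c.Sublist l ∧ c.length = k := by
  intro l
  induction l with
  | nil =>
      intro k c
      cases k with
      | zero => simp [combos, List.length_eq_zero_iff, List.sublist_nil]
      | succ k =>
          simp only [combos, List.not_mem_nil, false_iff, List.sublist_nil]
          rintro ⟨rfl, h⟩; simp at h
  | cons x xs ih =>
      intro k c
      cases k with
      | zero =>
          simp only [combos, List.mem_singleton]
          constructor
          · rintro rfl; exact ⟨List.nil_sublist _, rfl⟩
          · rintro ⟨_, h⟩; exact List.length_eq_zero_iff.mp h
      | succ k =>
          simp only [combos, List.mem_append, List.mem_map, ih]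
          constructor
          · rintro (⟨c', ⟨hs, hlen⟩, rfl⟩ | ⟨hs, hlen⟩)
            · exact ⟨List.cons_sublist_cons.mpr hs, by simp [hlen]⟩
            · exact ⟨hs.cons _, hlen⟩
          · rintro ⟨hs, hlen⟩
            rcases List.sublist_cons_iff.mp hs with h | ⟨r, rfl, hr⟩
            · exact Or.inr ⟨h, hlen⟩
            · exact Or.inl ⟨r, ⟨hr, by simpa using hlen⟩, rfl⟩

lemma filter_combos_eq_nil (d : List Int) (budget : Int) (k : Nat) :
    ((combos k d).filter (fun c => c.sum == budget) = []) ↔ ¬ Reach d k budget := by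
  rw [List.filter_eq_nil_iff]
  unfold Reach
  constructor
  · rintro h ⟨c, hs, hlen, hsum⟩
    exact h c ((mem_combos d k c).mpr ⟨hs, hlen⟩) (by simp [hsum])
  · intro h c hc hbeq
    rcases (mem_combos d k c).mp hc with ⟨hs, hlen⟩
    exact h ⟨c, hs, hlen, by simpa using hbeq⟩

lemma sublist_concat_iff (l₁ l₂ : List Int) (a : Int) :
    l₁.Sublist (l₂ ++ [a]) ↔ l₁.Sublist l₂ ∨ ∃ r, l₁ = r ++ [a] ∧ r.Sublist l₂ := by
  constructor
  · intro h
    have h2 : l₁.reverse.Sublist (a :: l₂.reverse) := by simpa using h.reverse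
    rcases List.sublist_cons_iff.mp h2 with h3 | ⟨r, hr, hs⟩
    · left; simpa using h3.reverse
    · right; exact ⟨r.reverse, by simpa using congrArg List.reverse hr, by simpa using hs.reverse⟩
  · rintro (h | ⟨r, rfl, hs⟩)
    · exact h.trans (List.sublist_append_left _ _)
    · exact hs.append (List.Sublist.refl _)

lemma reach_concat (l : List Int) (x : Int) (k : Nat) (s : Int) :
    Reach (l ++ [x]) k s ↔ Reach l k s ∨ ∃ k', k = k' + 1 ∧ Reach l k' (s - x) := by
  unfold Reach
  constructor
  · rintro ⟨c, hs, hlen, hsum⟩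
    rcases (sublist_concat_iff c l x).mp hs with h | ⟨r, rfl, hr⟩
    · exact Or.inl ⟨c, h, hlen, hsum⟩
    · refine Or.inr ⟨r.length, ?_, r, hr, rfl, ?_⟩
      · simpa using hlen.symm
      · simp at hsum; omega
  · rintro (⟨c, hs, hlen, hsum⟩ | ⟨k', rfl, c, hs, hlen, hsum⟩)
    · exact ⟨c, (sublist_concat_iff c l x).mpr (Or.inl hs), hlen, hsum⟩
    · refine ⟨c ++ [x], (sublist_concat_iff _ l x).mpr (Or.inr ⟨c, rfl, hs⟩), by simp [hlen], by simp; omega⟩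

lemma reach_nil (k : Nat) (s : Int) : Reach [] k s ↔ k = 0 ∧ s = 0 := by
  unfold Reach
  constructor
  · rintro ⟨c, hs, hlen, hsum⟩
    rcases List.sublist_nil.mp hs with rfl
    simp at hlen hsum; omega
  · rintro ⟨rfl, rfl⟩; exact ⟨[], List.nil_sublist _, rfl, rfl⟩

lemma mem_shiftSet (p : PySem.Set Int) (x s : Int) :
    s ∈ shiftSet p x ↔ s - x ∈ p := by
  unfold shiftSet
  rw [PySem.Set.mem_ofList, List.mem_map]
  constructor
  · rintro ⟨a, ha, rfl⟩; simpa using ha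
  · intro h; exact ⟨s - x, h, by ring⟩

lemma length_rowStep (x : Int) : ∀ (rest : List (PySem.Set Int)) (prev : PySem.Set Int),
    (rowStep x prev rest).length = rest.length := by
  intro rest
  induction rest with
  | nil => intro prev; rfl
  | cons cur rest' ih => intro prev; simp [rowStep, ih]

lemma mem_rowStep (x : Int) : ∀ (rest : List (PySem.Set Int)) (prev : PySem.Set Int) (j : Nat) (s : Int),
    s ∈ (rowStep x prev rest).getD j [] ↔
      j < rest.length ∧ (s ∈ rest.getD j [] ∨ s - x ∈ (prev :: rest).getD j []) := by
  intro rest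
  induction rest with
  | nil => intro prev j s; simp [rowStep, List.getD]
  | cons cur rest' ih =>
      intro prev j s
      cases j with
      | zero => simp [rowStep, PySem.Set.mem_union, mem_shiftSet]
      | succ j => simpa [rowStep, Nat.succ_lt_succ_iff] using ih cur j s

lemma inv_itemStep (l : List Int) (x : Int) (c : Nat) (t : List (PySem.Set Int))
    (h1 : t.length = c + 1)
    (h2 : ∀ (j : Nat) (s : Int), s ∈ t.getD j [] ↔ j ≤ c ∧ Reach l j s) :
    (itemStep t x).length = c + 1 ∧
      ∀ (j : Nat) (s : Int), s ∈ (itemStep t x).getD j [] ↔ j ≤ c ∧ Reach (l ++ [x]) j s := by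
  cases t with
  | nil => simp at h1
  | cons p rest =>
      have hrl : rest.length = c := by simpa using h1
      refine ⟨by simp [itemStep, length_rowStep, hrl], ?_⟩
      intro j s
      cases j with
      | zero =>
          simp only [itemStep, List.getD_cons_zero]
          rw [show (p : PySem.Set Int) = (p :: rest).getD 0 [] from rfl, h2 0 s, reach_concat]
          simp
      | succ j =>
          simp only [itemStep, List.getD_cons_succ]
          rw [mem_rowStep, hrl]
          have e1 : (rest.getD j []) = (p :: rest).getD (j + 1) [] := rfl
          rw [e1, h2 (j + 1) s, h2 j (s - x), reach_concat]
          constructor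
          · rintro ⟨hj, (⟨_, h⟩ | ⟨_, h⟩)⟩
            · exact ⟨by omega, Or.inl h⟩
            · exact ⟨by omega, Or.inr ⟨j, rfl, h⟩⟩
          · rintro ⟨hj, (h | ⟨k', hk, h⟩)⟩
            · exact ⟨by omega, Or.inl ⟨hj, h⟩⟩
            · obtain rfl : k' = j := by omega
              exact ⟨by omega, Or.inr ⟨by omega, h⟩⟩

lemma inv_foldl (c : Nat) : ∀ (ds l : List Int) (t : List (PySem.Set Int)),
    t.length = c + 1 →
    (∀ (j : Nat) (s : Int), s ∈ t.getD j [] ↔ j ≤ c ∧ Reach l j s) →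
    (ds.foldl itemStep t).length = c + 1 ∧
      ∀ (j : Nat) (s : Int), s ∈ (ds.foldl itemStep t).getD j [] ↔ j ≤ c ∧ Reach (l ++ ds) j s := by
  intro ds
  induction ds with
  | nil => intro l t h1 h2; simpa using ⟨h1, h2⟩
  | cons x ds' ih =>
      intro l t h1 h2
      obtain ⟨g1, g2⟩ := inv_itemStep l x c t h1 h2
      have := ih (l ++ [x]) (itemStep t x) g1 g2
      simpa [List.foldl_cons, List.append_assoc] using this

lemma inv_cappedRows (d : List Int) (c : Nat) :
    (cappedRows d c).length = c + 1 ∧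
      ∀ (j : Nat) (s : Int), s ∈ (cappedRows d c).getD j [] ↔ j ≤ c ∧ Reach d j s := by
  have h := inv_foldl c d [] (PySem.Set.ofList [0] :: List.replicate c PySem.Set.empty)
    (by simp [PySem.Set.ofList])
    (by
      intro j s
      cases j with
      | zero =>
          simp only [List.getD_cons_zero, PySem.Set.mem_ofList, reach_nil]
          simp
      | succ j =>
          rw [List.getD_cons_succ]
          rcases Nat.lt_or_ge j c with h | h
          · rw [List.getD_eq_getElem _ _ (by simpa using h)]
            simp [reach_nil, PySem.Set.empty]
          · rw [List.getD_eq_default _ _ (by simpa using h)]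
            simp [reach_nil])
  simpa using h

lemma sublist_compl : ∀ {c d : List Int}, c.Sublist d →
    ∃ c' : List Int, c'.Sublist d ∧ c.length + c'.length = d.length ∧ c.sum + c'.sum = d.sum := by
  intro c d h
  induction h with
  | slnil => exact ⟨[], by simp⟩
  | cons a h ih =>
      rcases ih with ⟨c', hs, hl, hsum⟩
      exact ⟨a :: c', hs.cons₂ a, by simp [← hl]; omega, by simp [← hsum]; ring⟩
  | cons₂ a h ih =>
      rcases ih with ⟨c', hs, hl, hsum⟩
      exact ⟨c', hs.cons a, by simp [← hl]; omega, by simp [← hsum]; ring⟩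

lemma reach_compl (d : List Int) (k : Nat) (s : Int) :
    Reach d k s → Reach d (d.length - k) (d.sum - s) := by
  rintro ⟨c, hs, hlen, hsum⟩
  rcases sublist_compl hs with ⟨c', hs', hl, hsum'⟩
  exact ⟨c', hs', by omega, by omega⟩

lemma reach_compl_iff (d : List Int) (k : Nat) (s : Int) (hk : k ≤ d.length) :
    Reach d k s ↔ Reach d (d.length - k) (d.sum - s) := by
  constructor
  · exact reach_compl d k s
  · intro h
    have := reach_compl d (d.length - k) (d.sum - s) h
    have e1 : d.length - (d.length - k) = k := by omega
    have e2 : d.sum - (d.sum - s) = s := by ring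
    rwa [e1, e2] at this

lemma loops_eq (d : List Int) (budget : Int) :
    ∀ ks : List Int, (∀ c ∈ ks, 1 ≤ c ∧ c ≤ (d.length : Int) - 1) →
      aLoop d budget (ks.map (fun c => (d.length : Int) - c)) =
        bLoop d (d.sum - budget) (d.length : Int) ks := by
  intro ks
  induction ks with
  | nil => intro _; rfl
  | cons c rest ih =>
      intro hb
      obtain ⟨h1, h2⟩ := hb c (List.mem_cons_self ..)
      obtain ⟨hlen, hmem⟩ := inv_cappedRows d c.toNat
      have hcl : c.toNat < (cappedRows d c.toNat).length := by omega
      have hget : PySem.List.pyGet? (cappedRows d c.toNat) c = some (cappedRows d c.toNat)[c.toNat] :=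
        PySem.List.pyGet?_eq_some_getElem _ (by omega) (by omega)
      have hgetD : (cappedRows d c.toNat)[c.toNat] = (cappedRows d c.toNat).getD c.toNat [] :=
        (List.getD_eq_getElem _ _ hcl).symm
      have hB : d.sum - budget ∈ (cappedRows d c.toNat).getD c.toNat [] ↔
          Reach d ((d.length : Int) - c).toNat budget := by
        rw [hmem]
        have hkn : c.toNat ≤ d.length := by omega
        have e : d.length - c.toNat = ((d.length : Int) - c).toNat := by omega
        rw [reach_compl_iff d c.toNat (d.sum - budget) hkn]
        have e2 : d.sum - (d.sum - budget) = budget := by ring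
        rw [e, e2]
        constructor
        · exact And.right
        · exact fun h => ⟨le_rfl, h⟩
      simp only [List.map_cons, aLoop, bLoop, hget]
      by_cases hr : Reach d ((d.length : Int) - c).toNat budget
      · rw [if_neg (by rw [filter_combos_eq_nil]; exact not_not_intro hr),
          if_pos (by rw [hgetD, hB]; exact hr)]
      · rw [if_pos ((filter_combos_eq_nil d budget _).mpr hr),
          if_neg (by rw [hgetD, hB]; exact hr)]
        exact ih (fun j hj => hb j (List.mem_cons_of_mem _ hj))

lemma pyRange_countdown_eq_map (n : Int) :
    PySem.List.pyRange (n - 1) 0 (-1) = (PySem.List.pyRange 1 n 1).map (fun c => n - c) := by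
  rw [PySem.List.pyRange_neg_one, PySem.List.pyRange_one, List.map_map]
  have e1 : (n - 1 - 0).toNat = (n - 1).toNat := by norm_num
  rw [e1]
  apply List.map_congr_left
  intro k _
  simp only [Function.comp]
  ring

-- ===== VERDICT (by name: the statement is the Claim_ definition above) =====
theorem solution_spec : Claim_equal_solution := by
  unfold Claim_equal_solution
  intro d budget _
  unfold Spec_solution solution solution_alt
  by_cases h : d.sum ≤ budget
  · rw [if_pos h, if_pos h]
  · rw [if_neg h, if_neg h]
    rw [pyRange_countdown_eq_map]
    refine loops_eq d budget _ ?_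
    intro c hc
    rw [PySem.List.mem_pyRange_one] at hc
    omega
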